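-- pv_equiv track=rewrite | github.com/Seren666/EmailClassifiction | scripts/run_author_extract_smoke.py | ordered_overlap
-- ===== SOURCE A (Python) =====
-- def ordered_overlap(predicted: list[str], ground_truth: list[str]) -> int:
--     gt_index = 0
--     matched = 0
--     for name in predicted:
--         while gt_index < len(ground_truth) and ground_truth[gt_index] != name:
--             gt_index += 1
--         if gt_index >= len(ground_truth):
--             break
--         matched += 1
--         gt_index += 1
--     return matched
-- ===== SOURCE B (Python) =====
-- def ordered_overlap(predicted: list[str], ground_truth: list[str]) -> int:
--     matched = 0
--     rest = ground_truth
--     for name in predicted: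
--         if name not in rest:
--             break
--         rest = rest[rest.index(name) + 1:]
--         matched += 1
--     return matched
-- ===== Notes on version B (the rewrite author's own statement) =====
-- stated objective: alternative
-- what changed: B keeps no index state at all: it repeatedly searches the remaining ground-truth suffix with membership + list.index and re-slices to the suffix after the match, replacing A's two-pointer walk with the inner while-skip.
import Mathlib
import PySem

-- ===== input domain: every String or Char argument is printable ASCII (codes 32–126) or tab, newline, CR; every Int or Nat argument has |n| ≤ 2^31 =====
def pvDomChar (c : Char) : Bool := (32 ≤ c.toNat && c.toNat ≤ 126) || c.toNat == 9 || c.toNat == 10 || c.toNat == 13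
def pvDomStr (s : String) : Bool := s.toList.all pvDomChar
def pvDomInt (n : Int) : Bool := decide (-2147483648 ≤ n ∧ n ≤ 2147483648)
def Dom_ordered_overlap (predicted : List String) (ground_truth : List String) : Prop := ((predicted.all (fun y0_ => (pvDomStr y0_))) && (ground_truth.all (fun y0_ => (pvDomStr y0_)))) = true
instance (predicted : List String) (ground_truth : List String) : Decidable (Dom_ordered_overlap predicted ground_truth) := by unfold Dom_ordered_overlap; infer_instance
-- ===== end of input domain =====

-- B keeps no index state: it repeatedly searches the remaining ground-truth suffix with
-- membership + list.index and re-slices to the suffix after the match (objective: alternative).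
-- ===== PORT A =====
-- the inner `while gt_index < len(ground_truth) and ground_truth[gt_index] != name: gt_index += 1`
def oaSkip (gt : List String) (name : String) (i : Nat) : Nat :=
  if i < gt.length ∧ gt[i]? ≠ some name then oaSkip gt name (i+1) else i
termination_by gt.length - i
decreasing_by omega

-- the `for name in predicted` loop with state (gt_index, matched); the break returns matched
def oaLoop (gt : List String) : List String → Nat → Int → Int
  | [], _, matched => matched
  | name :: rest, gtIndex, matched =>
      let i := oaSkip gt name gtIndex
      if i ≥ gt.length then matched
      else oaLoop gt rest (i+1) (matched+1)

def ordered_overlap (predicted : List String) (ground_truth : List String) : Int :=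
  oaLoop ground_truth predicted 0 0

-- ===== PORT B =====
-- the `for name in predicted` loop with state (rest, matched); `name not in rest` breaks,
-- otherwise rest becomes rest[rest.index(name)+1:] (the .index succeeds: membership was checked)
def obLoop : List String → List String → Int → Int
  | [], _, matched => matched
  | name :: ps, rest, matched =>
      if name ∈ rest then
        obLoop ps
          (PySem.List.slice rest (some (((PySem.List.index? rest name).getD 0 : Nat) + 1 : Int)) none)
          (matched + 1)
      else matched

def ordered_overlap_alt (predicted : List String) (ground_truth : List String) : Int :=
  obLoop predicted ground_truth 0

-- ===== PRECONDITION & SPEC =====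
def Spec_ordered_overlap (predicted : List String) (ground_truth : List String) (out : Int) : Prop := out = ordered_overlap_alt predicted ground_truth
instance (predicted : List String) (ground_truth : List String) (out : Int) : Decidable (Spec_ordered_overlap predicted ground_truth out) := by unfold Spec_ordered_overlap; infer_instance

-- ===== CLAIM (what is proved, stated in full; the proofs are below) =====
def Claim_equal_ordered_overlap : Prop := ∀ (predicted : List String) (ground_truth : List String), Dom_ordered_overlap predicted ground_truth → Spec_ordered_overlap predicted ground_truth (ordered_overlap predicted ground_truth)

-- ===== LEMMAS AND PROOFS =====
-- canonical greedy count, common to both proofs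
def F : List String → List String → Int
  | [], _ => 0
  | name :: ps, s =>
      match s.dropWhile (fun x => x ≠ name) with
      | [] => 0
      | _ :: t => 1 + F ps t

theorem oaSkip_spec (gt : List String) (name : String) (i : Nat) (h : i ≤ gt.length) :
    gt.drop (oaSkip gt name i) = (gt.drop i).dropWhile (fun x => x ≠ name) ∧
    oaSkip gt name i ≤ gt.length := by
  fun_induction oaSkip gt name i with
  | case1 i hc ih =>
    obtain ⟨hlt, hne⟩ := hc
    have h1 : i + 1 ≤ gt.length := hlt
    obtain ⟨ihd, ihb⟩ := ih h1
    refine ⟨?_, ihb⟩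
    have hne' : gt[i] ≠ name := fun he =>
      hne (by rw [List.getElem?_eq_getElem hlt]; exact congrArg some he)
    rw [ihd, List.drop_eq_getElem_cons hlt, List.dropWhile_cons,
      if_pos (by simpa using hne')]
  | case2 i hc =>
    by_cases hlt : i < gt.length
    · have hsome : gt[i]? = some name := by
        by_contra hne; exact hc ⟨hlt, hne⟩
      have hval : gt[i] = name := by
        have := List.getElem?_eq_getElem hlt; rw [this] at hsome; exact Option.some.inj hsome
      refine ⟨?_, h⟩
      rw [List.drop_eq_getElem_cons hlt, List.dropWhile_cons,
        if_neg (by simp [hval])]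
    · have : i = gt.length := by omega
      subst this
      simp

theorem oaLoop_eq_F (gt : List String) (pred : List String) :
    ∀ i m, i ≤ gt.length → oaLoop gt pred i m = m + F pred (gt.drop i) := by
  induction pred with
  | nil => intro i m _; simp [oaLoop, F]
  | cons name rest ih =>
    intro i m h
    obtain ⟨hd, hb⟩ := oaSkip_spec gt name i h
    show (if oaSkip gt name i ≥ gt.length then m
      else oaLoop gt rest (oaSkip gt name i + 1) (m+1)) = m + F (name :: rest) (gt.drop i)
    by_cases hge : oaSkip gt name i ≥ gt.length
    · have heq : oaSkip gt name i = gt.length := by omega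
      have hnil : (gt.drop i).dropWhile (fun x => x ≠ name) = [] := by
        rw [← hd, heq]; simp
      have hF : F (name :: rest) (gt.drop i) = 0 := by
        simp only [F, hnil]
      rw [if_pos hge, hF]
      ring
    · have hlt : oaSkip gt name i < gt.length := by omega
      have hcons : gt.drop (oaSkip gt name i) =
          gt[oaSkip gt name i] :: gt.drop (oaSkip gt name i + 1) :=
        List.drop_eq_getElem_cons hlt
      have hdw : (gt.drop i).dropWhile (fun x => x ≠ name) =
          gt[oaSkip gt name i] :: gt.drop (oaSkip gt name i + 1) := by
        rw [← hd]; exact hcons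
      rw [if_neg hge, ih (oaSkip gt name i + 1) (m+1) (by omega)]
      show m + 1 + F rest (gt.drop (oaSkip gt name i + 1)) = m + F (name :: rest) (gt.drop i)
      rw [show F (name :: rest) (gt.drop i) = 1 + F rest (gt.drop (oaSkip gt name i + 1)) by
        simp only [F, hdw]]
      ring

-- the dropWhile-to-index bridge for B's suffix slicing
theorem dropWhile_of_index? (gt : List String) (name : String) (k : Nat)
    (h : PySem.List.index? gt name = some k) :
    gt.dropWhile (fun x => x ≠ name) = name :: gt.drop (k + 1) := by
  obtain ⟨pre, suf, hgt, hlen, hmem⟩ := (PySem.List.index?_eq_some_iff gt name k).mp h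
  subst hgt
  have hdw : ∀ pre' : List String, name ∉ pre' →
      (pre' ++ name :: suf).dropWhile (fun x => x ≠ name) = name :: suf := by
    intro pre' hp
    induction pre' with
    | nil => simp
    | cons y ys ihy =>
      have hy : y ≠ name := fun he => hp (by simp [he])
      have hys : name ∉ ys := fun hm => hp (by simp [hm])
      simp only [List.cons_append, List.dropWhile_cons]
      rw [if_pos (by simpa using hy)]
      exact ihy hys
  rw [hdw pre hmem, ← hlen]
  simp [List.drop_append]

theorem dropWhile_of_not_mem (gt : List String) (name : String) (h : name ∉ gt) :
    gt.dropWhile (fun x => x ≠ name) = [] := by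
  rw [List.dropWhile_eq_nil_iff]
  intro x hx
  simp only [ne_eq, decide_not, Bool.not_eq_eq_eq_not, Bool.not_true, decide_eq_false_iff_not]
  exact fun he => h (he ▸ hx)

theorem obLoop_eq_F (pred : List String) :
    ∀ gt m, obLoop pred gt m = m + F pred gt := by
  induction pred with
  | nil => intro gt m; simp [obLoop, F]
  | cons name ps ih =>
    intro gt m
    show (if name ∈ gt then
        obLoop ps
          (PySem.List.slice gt (some (((PySem.List.index? gt name).getD 0 : Nat) + 1 : Int)) none)
          (m + 1)
      else m) = m + F (name :: ps) gt
    by_cases hmem : name ∈ gt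
    · obtain ⟨k, hk⟩ := Option.isSome_iff_exists.mp
        ((PySem.List.index?_isSome_iff gt name).mpr hmem)
      have hslice : PySem.List.slice gt
          (some (((PySem.List.index? gt name).getD 0 : Nat) + 1 : Int)) none = gt.drop (k + 1) := by
        rw [hk]
        have : ((k : Int) + 1) = ((k + 1 : Nat) : Int) := by push_cast; ring
        simp only [Option.getD_some, this, PySem.List.slice_from_natCast]
      rw [if_pos hmem, hslice, ih (gt.drop (k+1)) (m+1)]
      rw [show F (name :: ps) gt = 1 + F ps (gt.drop (k+1)) by
        simp only [F, dropWhile_of_index? gt name k hk]]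
      ring
    · rw [if_neg hmem]
      rw [show F (name :: ps) gt = 0 by
        simp only [F, dropWhile_of_not_mem gt name hmem]]
      ring

-- ===== VERDICT (by name: the statement is the Claim_ definition above) =====
theorem ordered_overlap_spec : Claim_equal_ordered_overlap := by
  intro pred gt _
  unfold Spec_ordered_overlap ordered_overlap ordered_overlap_alt
  rw [oaLoop_eq_F gt pred 0 0 (Nat.zero_le _), obLoop_eq_F pred gt 0]
  simp
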